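-- pv_equiv track=rewrite | github.com/arnabbiswas1510/dsaWithPrateek | Lecture_8-Queues-I/6-sumOfKsubArray.py | SumOfKsubArray
-- ===== SOURCE A (Python) =====
-- from collections import deque
--
-- def SumOfKsubArray(arr, n , k):
--
--     Sum = 0 # Initialize result
--
--     # The queue will store indexes of useful elements
--     # in every window
--     # In deque 'G' we maintain decreasing order of
--     # values from front to rear
--     # In deque 'S' we maintain increasing order of
--     # values from front to rear
--     S = deque() #Monotonically increasing
--     G = deque() #Monotonically decreasing
--
--
--     # Process first window of size K
--
--     for i in range(k):
--
--         # Remove all previous greater elements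
--         # that are useless.
--         while ( len(S) > 0 and arr[S[-1]] >= arr[i]):
--             S.pop() # Remove from rear
--
--         # Remove all previous smaller that are elements
--         # are useless.
--         while ( len(G) > 0 and arr[G[-1]] <= arr[i]):
--             G.pop() # Remove from rear
--
--         # Add current element at rear of both deque
--         G.append(i)
--         S.append(i)
--
--     # Process rest of the Array elements
--     for i in range(k, n):
--
--         # Element at the front of the deque 'G' & 'S' is the largest and smallest element of previous window respectively
--         Sum += arr[S[0]] + arr[G[0]]
--
--         # Remove all elements which are out of this window
--         while ( len(S) > 0 and S[0] <= i - k):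
--             S.popleft()
--         while ( len(G) > 0 and G[0] <= i - k):
--             G.popleft()
--
--         # remove all previous greater element that are useless
--         while ( len(S) > 0 and arr[S[-1]] >= arr[i]):
--             S.pop() # Remove from rear
--
--         # remove all previous smaller that are elements are useless
--         while ( len(G) > 0 and arr[G[-1]] <= arr[i]):
--             G.pop() # Remove from rear
--
--         # Add current element at rear of both deque
--         G.append(i)
--         S.append(i)
--
--     # Sum of minimum and maximum element of last window
--     Sum += arr[S[0]] + arr[G[0]]
--
--     return Sum
-- ===== SOURCE B (Python) =====
-- def SumOfKsubArray(arr, n, k):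
--     # Plain repeated scan: one window per start, finding min and max directly.
--     # A always scores its priming window arr[0:k] (even when n < k), hence max(..., 1).
--     Sum = 0
--     for start in range(max(n - k + 1, 1)):
--         mn = arr[start]
--         mx = arr[start]
--         for j in range(1, k):
--             v = arr[start + j]
--             if v < mn:
--                 mn = v
--             if v > mx:
--                 mx = v
--         Sum += mn + mx
--     return Sum
-- ===== Notes on version B (the rewrite author's own statement) =====
-- stated objective: simpler
-- what changed: Drops the two monotonic deques: B iterates over the window starts and scans each window's k elements directly for its min and max (keeping A's always-scored priming window arr[0:k]).
import Mathlib
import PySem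

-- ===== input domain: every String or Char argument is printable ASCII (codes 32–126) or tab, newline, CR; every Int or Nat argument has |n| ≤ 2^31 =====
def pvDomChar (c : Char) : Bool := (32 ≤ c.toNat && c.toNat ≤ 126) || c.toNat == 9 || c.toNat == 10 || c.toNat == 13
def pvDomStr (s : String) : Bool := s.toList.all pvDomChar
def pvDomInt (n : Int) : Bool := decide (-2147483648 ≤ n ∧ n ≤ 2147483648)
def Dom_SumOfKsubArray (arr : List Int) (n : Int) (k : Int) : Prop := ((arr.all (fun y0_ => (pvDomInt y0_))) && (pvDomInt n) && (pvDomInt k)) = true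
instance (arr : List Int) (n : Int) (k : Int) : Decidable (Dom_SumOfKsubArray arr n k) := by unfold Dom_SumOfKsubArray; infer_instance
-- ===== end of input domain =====

-- B replaces A's two monotonic deques by a direct min/max scan of each window (simpler);
-- like A, B always scores the priming window arr[0:k] (the max(..., 1)), so they agree on all of Pre_.


-- ===== PORT A =====
-- arr[i]; Pre_ keeps every access in range, so the default is never read there
def pvElem (arr : List Int) (i : Int) : Int := (PySem.List.pyGet? arr i).getD 0

-- "while len(S) > 0 and p(S[-1]): S.pop()"  (pop from the rear while the rear satisfies p)
def pvPopRear (p : Int → Bool) (S : List Int) : List Int := ((S.reverse).dropWhile p).reverse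

-- body of the first loop: pop both rears, then append i to both deques
def pvStep1 (arr : List Int) (sg : List Int × List Int) (i : Int) : List Int × List Int :=
  (pvPopRear (fun j => decide (pvElem arr j ≥ pvElem arr i)) sg.1 ++ [i],
   pvPopRear (fun j => decide (pvElem arr j ≤ pvElem arr i)) sg.2 ++ [i])

-- body of the second loop: add fronts to Sum, drop out-of-window fronts, pop rears, append i
-- (S[0]/G[0] read via headD 0: under Pre_ the deques are nonempty wherever Python reads them)
def pvStep2 (arr : List Int) (k : Int) (st : Int × List Int × List Int) (i : Int) : Int × List Int × List Int :=
  (st.1 + pvElem arr (st.2.1.headD 0) + pvElem arr (st.2.2.headD 0),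
   pvPopRear (fun j => decide (pvElem arr j ≥ pvElem arr i)) ((st.2.1).dropWhile (fun j => decide (j ≤ i - k))) ++ [i],
   pvPopRear (fun j => decide (pvElem arr j ≤ pvElem arr i)) ((st.2.2).dropWhile (fun j => decide (j ≤ i - k))) ++ [i])

def SumOfKsubArray (arr : List Int) (n : Int) (k : Int) : Int :=
  let sg := (PySem.List.pyRange 0 k 1).foldl (pvStep1 arr) ([], [])
  let st := (PySem.List.pyRange k n 1).foldl (pvStep2 arr k) (0, sg.1, sg.2)
  st.1 + pvElem arr (st.2.1.headD 0) + pvElem arr (st.2.2.headD 0)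

-- ===== PORT B =====
-- inner loop body: fold the running (min, max) with v = arr[start + j]
def pvScanMinMax (arr : List Int) (start : Int) (p : Int × Int) (j : Int) : Int × Int :=
  (if pvElem arr (start + j) < p.1 then pvElem arr (start + j) else p.1,
   if pvElem arr (start + j) > p.2 then pvElem arr (start + j) else p.2)

-- (min, max) of the window arr[start .. start+k-1], scanned directly
def pvWindow (arr : List Int) (k : Int) (start : Int) : Int × Int :=
  (PySem.List.pyRange 1 k 1).foldl (pvScanMinMax arr start) (pvElem arr start, pvElem arr start)

def SumOfKsubArray_alt (arr : List Int) (n : Int) (k : Int) : Int :=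
  (PySem.List.pyRange 0 (max (n - k + 1) 1) 1).foldl
    (fun Sum start => Sum + (pvWindow arr k start).1 + (pvWindow arr k start).2) 0

-- ===== PRECONDITION & SPEC =====
-- exactly the inputs where the Python A returns: k ≥ 1 (else the deques are read empty: IndexError)
-- and every index the loops touch is in range (IndexError otherwise)
def Pre_SumOfKsubArray (arr : List Int) (n : Int) (k : Int) : Prop :=
  1 ≤ k ∧ k ≤ (arr.length : Int) ∧ n ≤ (arr.length : Int)
instance (arr : List Int) (n : Int) (k : Int) : Decidable (Pre_SumOfKsubArray arr n k) := by
  unfold Pre_SumOfKsubArray; infer_instance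

def pvWitness_SumOfKsubArray : List Int × Int × Int := ([1, 2, 3], 3, 2)

def Spec_SumOfKsubArray (arr : List Int) (n : Int) (k : Int) (out : Int) : Prop :=
  out = SumOfKsubArray_alt arr n k
instance (arr : List Int) (n : Int) (k : Int) (out : Int) : Decidable (Spec_SumOfKsubArray arr n k out) := by
  unfold Spec_SumOfKsubArray; infer_instance

-- ===== CLAIM (what is proved, stated in full; the proofs are below) =====
def Claim_equal_SumOfKsubArray : Prop := ∀ (arr : List Int) (n : Int) (k : Int), Dom_SumOfKsubArray arr n k → Pre_SumOfKsubArray arr n k → Spec_SumOfKsubArray arr n k (SumOfKsubArray arr n k)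

-- ===== LEMMAS AND PROOFS =====

-- strict "better" orders for the two deques: S keeps smaller-first, G keeps greater-first
def pvLtS : Int → Int → Bool := fun x y => decide (x < y)
def pvLtG : Int → Int → Bool := fun x y => decide (y < x)

-- keep j of the window [s, s+m] iff arr[j] beats every later window element (the deque's content)
def pvCond (lt : Int → Int → Bool) (a : Int → Int) (e : Int) (j : Int) : Bool :=
  (PySem.List.pyRange (j + 1) (e + 1) 1).all (fun mm => lt (a j) (a mm))
def pvCand (lt : Int → Int → Bool) (a : Int → Int) (s : Int) (m : Nat) : List Int :=
  (PySem.List.pyRange s (s + m + 1) 1).filter (pvCond lt a (s + m))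

theorem pvCand_zero (lt : Int → Int → Bool) (a : Int → Int) (s : Int) :
    pvCand lt a s 0 = [s] := by
  simp [pvCand, pvCond, PySem.List.pyRange_one_singleton, PySem.List.pyRange_one_eq_nil]

theorem pvCand_succ (lt : Int → Int → Bool) (a : Int → Int) (s : Int) (m : Nat) :
    pvCand lt a s (m + 1)
      = (pvCand lt a s m).filter (fun j => lt (a j) (a (s + m + 1))) ++ [s + m + 1] := by
  unfold pvCand
  push_cast
  rw [show s + ((m : Int) + 1) + 1 = (s + m + 1) + 1 by ring,
      show s + ((m : Int) + 1) = s + m + 1 by ring,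
      PySem.List.pyRange_one_succ_right (by omega : s ≤ s + (m : Int) + 1),
      List.filter_append, List.filter_filter]
  congr 1
  · apply List.filter_congr
    intro j hj
    rw [PySem.List.mem_pyRange_one] at hj
    unfold pvCond
    rw [PySem.List.pyRange_one_succ_right (by omega : j + 1 ≤ s + (m : Int) + 1), List.all_append]
    simp [Bool.and_comm]
  · unfold pvCond
    simp [PySem.List.pyRange_one_eq_nil]

theorem pvCand_pairwise (lt : Int → Int → Bool) (a : Int → Int) (s : Int) (m : Nat) :
    (pvCand lt a s m).Pairwise (fun x y => lt (a x) (a y) = true) := by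
  induction m with
  | zero => rw [pvCand_zero]; simp
  | succ m ih =>
    rw [pvCand_succ]
    apply List.pairwise_append.mpr
    refine ⟨ih.filter _, by simp, ?_⟩
    intro x hx y hy
    simp only [List.mem_singleton] at hy
    subst hy
    exact (List.mem_filter.mp hx).2

theorem pvCand_ne_nil (lt : Int → Int → Bool) (a : Int → Int) (s : Int) (m : Nat) :
    pvCand lt a s m ≠ [] := by
  cases m with
  | zero => rw [pvCand_zero]; simp
  | succ m => rw [pvCand_succ]; simp

theorem pvPopRear_filter (lt : Int → Int → Bool) (a : Int → Int) (x : Int)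
    (htr : ∀ u v w, lt u v = true → lt v w = true → lt u w = true)
    (S : List Int) (hp : S.Pairwise (fun u v => lt (a u) (a v) = true)) :
    pvPopRear (fun j => !(lt (a j) x)) S = S.filter (fun j => lt (a j) x) := by
  induction S with
  | nil => rfl
  | cons h t ih =>
    rw [List.pairwise_cons] at hp
    obtain ⟨hhead, hpt⟩ := hp
    by_cases hL : lt (a h) x = true
    · unfold pvPopRear
      rw [List.reverse_cons, List.dropWhile_append]
      by_cases hE : (t.reverse.dropWhile (fun j => !(lt (a j) x))).isEmpty = true
      · have hall : ∀ y ∈ t.reverse, (!(lt (a y) x)) = true := by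
          rw [← List.dropWhile_eq_nil_iff]
          exact List.isEmpty_iff.mp hE
        have hfil : t.filter (fun j => lt (a j) x) = [] := by
          apply List.filter_eq_nil_iff.mpr
          intro y hy
          have := hall y (List.mem_reverse.mpr hy)
          simp_all
        simp [hE, List.dropWhile, hL, hfil]
      · have hiht := ih hpt
        unfold pvPopRear at hiht
        simp [hE, hL, hiht]
    · have hnone : ∀ y ∈ h :: t, (!(lt (a y) x)) = true := by
        intro y hy
        rcases List.mem_cons.mp hy with rfl | hyt
        · simp [hL]
        · simp only [Bool.not_eq_true']
          by_contra hc
          simp only [Bool.not_eq_false] at hc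
          exact hL (htr _ _ _ (hhead y hyt) hc)
      have : (h :: t).reverse.dropWhile (fun j => !(lt (a j) x)) = [] := by
        apply List.dropWhile_eq_nil_iff.mpr
        intro y hy
        exact hnone y (List.mem_reverse.mp hy)
      unfold pvPopRear
      rw [this]
      symm
      apply List.filter_eq_nil_iff.mpr
      intro y hy
      have := hnone y hy
      simp_all

theorem pvCand_slide (lt : Int → Int → Bool) (a : Int → Int) (s : Int) (m : Nat) :
    (pvCand lt a s (m + 1)).dropWhile (fun j => decide (j ≤ s)) = pvCand lt a (s + 1) m := by
  unfold pvCand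
  push_cast
  rw [show s + ((m : Int) + 1) = s + 1 + m by ring,
      show s + 1 + (m : Int) + 1 = s + 1 + m + 1 by ring,
      PySem.List.pyRange_one_cons (by omega : s < s + 1 + (m : Int) + 1), List.filter_cons]
  have hX : ∀ x ∈ (PySem.List.pyRange (s + 1) (s + 1 + (m : Int) + 1) 1).filter (pvCond lt a (s + 1 + m)),
      decide (x ≤ s) = false := by
    intro x hx
    have := PySem.List.mem_pyRange_one.mp (List.mem_filter.mp hx).1
    simp
    omega
  have hid : (((PySem.List.pyRange (s + 1) (s + 1 + (m : Int) + 1) 1).filter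
      (pvCond lt a (s + 1 + m))).dropWhile (fun j => decide (j ≤ s)))
      = (PySem.List.pyRange (s + 1) (s + 1 + (m : Int) + 1) 1).filter (pvCond lt a (s + 1 + m)) := by
    cases hc : (PySem.List.pyRange (s + 1) (s + 1 + (m : Int) + 1) 1).filter (pvCond lt a (s + 1 + m)) with
    | nil => rfl
    | cons y ys =>
      rw [List.dropWhile_cons]
      have : decide (y ≤ s) = false := by
        apply hX
        rw [hc]
        exact List.mem_cons_self
      simp [this]
  split_ifs
  · rw [List.dropWhile_cons]
    simp only [decide_eq_true_eq, le_refl, if_true, hid]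
  · exact hid

theorem pvCand_head (lt : Int → Int → Bool) (a : Int → Int)
    (htr : ∀ u v w, lt u v = true → lt v w = true → lt u w = true)
    (hto : ∀ u v, lt u v = false → lt v u = false → u = v)
    (has : ∀ u v, lt u v = true → lt v u = false)
    (m : Nat) (s : Int) :
    a ((pvCand lt a s m).headD 0)
      = (PySem.List.pyRange 1 (m + 1) 1).foldl
          (fun acc j => if lt (a (s + j)) acc then a (s + j) else acc) (a s) := by
  induction m with
  | zero => rw [pvCand_zero]; simp [PySem.List.pyRange_one_eq_nil]
  | succ m ih =>
    obtain ⟨h, t, hht⟩ := List.ne_nil_iff_exists_cons.mp (pvCand_ne_nil lt a s m)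
    have hpw := pvCand_pairwise lt a s m
    rw [hht, List.pairwise_cons] at hpw
    obtain ⟨hhead, hpt⟩ := hpw
    have hih := ih
    rw [hht] at hih
    simp only [List.headD_cons] at hih
    rw [pvCand_succ, hht]
    push_cast
    rw [PySem.List.pyRange_one_succ_right (by omega : (1 : Int) ≤ (m : Int) + 1),
        List.foldl_append, ← hih]
    simp only [List.foldl_cons, List.foldl_nil]
    by_cases hL : lt (a h) (a (s + m + 1)) = true
    · rw [List.filter_cons_of_pos (by exact hL)]
      have hfa : lt (a (s + ((m : Int) + 1))) (a h) = false := by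
        have := has _ _ hL
        rw [show s + ((m : Int) + 1) = s + m + 1 by ring]
        exact this
      simp [hfa]
    · have hfil : (h :: t).filter (fun j => lt (a j) (a (s + m + 1))) = [] := by
        apply List.filter_eq_nil_iff.mpr
        intro y hy
        rcases List.mem_cons.mp hy with rfl | hyt
        · simp [hL]
        · simp only [Bool.not_eq_true]
          by_contra hc
          simp only [Bool.not_eq_false] at hc
          exact absurd (htr _ _ _ (hhead y hyt) hc) (by simp [hL])
      rw [hfil]
      simp only [List.nil_append, List.headD_cons]
      rw [show s + ((m : Int) + 1) = s + m + 1 by ring]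
      by_cases hc : lt (a (s + m + 1)) (a h) = true
      · simp [hc]
      · have := hto _ _ (by simpa using hL) (by simpa using hc)
        simp [this]

theorem pvFoldl_pair {α : Type} (f1 f2 : Int → α → Int) (l : List α) (x y : Int) :
    l.foldl (fun (p : Int × Int) j => (f1 p.1 j, f2 p.2 j)) (x, y) = (l.foldl f1 x, l.foldl f2 y) := by
  induction l generalizing x y with
  | nil => rfl
  | cons h t ih => simp [List.foldl_cons, ih]

theorem pvWindow_eq (arr : List Int) (kk : Nat) (s : Int) :
    pvWindow arr ((kk : Int) + 1) s
      = (pvElem arr ((pvCand pvLtS (pvElem arr) s kk).headD 0),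
         pvElem arr ((pvCand pvLtG (pvElem arr) s kk).headD 0)) := by
  have trS : ∀ u v w : Int, pvLtS u v = true → pvLtS v w = true → pvLtS u w = true := by
    intro u v w; simp [pvLtS]; omega
  have toS : ∀ u v : Int, pvLtS u v = false → pvLtS v u = false → u = v := by
    intro u v; simp [pvLtS]; omega
  have asS : ∀ u v : Int, pvLtS u v = true → pvLtS v u = false := by
    intro u v; simp [pvLtS]; omega
  have trG : ∀ u v w : Int, pvLtG u v = true → pvLtG v w = true → pvLtG u w = true := by
    intro u v w; simp [pvLtG]; omega
  have toG : ∀ u v : Int, pvLtG u v = false → pvLtG v u = false → u = v := by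
    intro u v; simp [pvLtG]; omega
  have asG : ∀ u v : Int, pvLtG u v = true → pvLtG v u = false := by
    intro u v; simp [pvLtG]; omega
  unfold pvWindow pvScanMinMax
  rw [pvFoldl_pair (fun acc j => if pvElem arr (s + j) < acc then pvElem arr (s + j) else acc)
        (fun acc j => if pvElem arr (s + j) > acc then pvElem arr (s + j) else acc)]
  rw [pvCand_head pvLtS (pvElem arr) trS toS asS kk s,
      pvCand_head pvLtG (pvElem arr) trG toG asG kk s]
  simp only [pvLtS, pvLtG, decide_eq_true_eq, gt_iff_lt]

theorem pvFirstLoop (arr : List Int) (m : Nat) :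
    (PySem.List.pyRange 0 ((m : Int) + 1) 1).foldl (pvStep1 arr) ([], [])
      = (pvCand pvLtS (pvElem arr) 0 m, pvCand pvLtG (pvElem arr) 0 m) := by
  have trS : ∀ u v w : Int, pvLtS u v = true → pvLtS v w = true → pvLtS u w = true := by
    intro u v w; simp [pvLtS]; omega
  have trG : ∀ u v w : Int, pvLtG u v = true → pvLtG v w = true → pvLtG u w = true := by
    intro u v w; simp [pvLtG]; omega
  have hpS : ∀ (i : Int) (S : List Int), S.Pairwise (fun u v => pvLtS (pvElem arr u) (pvElem arr v) = true) →
      pvPopRear (fun j => decide (pvElem arr j ≥ pvElem arr i)) S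
        = S.filter (fun j => pvLtS (pvElem arr j) (pvElem arr i)) := by
    intro i S hp
    rw [show (fun j => decide (pvElem arr j ≥ pvElem arr i))
          = (fun j => !(pvLtS (pvElem arr j) (pvElem arr i))) by
        funext j; simp [pvLtS, ← decide_not, not_lt, ge_iff_le]]
    exact pvPopRear_filter pvLtS (pvElem arr) _ trS S hp
  have hpG : ∀ (i : Int) (S : List Int), S.Pairwise (fun u v => pvLtG (pvElem arr u) (pvElem arr v) = true) →
      pvPopRear (fun j => decide (pvElem arr j ≤ pvElem arr i)) S
        = S.filter (fun j => pvLtG (pvElem arr j) (pvElem arr i)) := by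
    intro i S hp
    rw [show (fun j => decide (pvElem arr j ≤ pvElem arr i))
          = (fun j => !(pvLtG (pvElem arr j) (pvElem arr i))) by
        funext j; simp [pvLtG, ← decide_not, not_lt]]
    exact pvPopRear_filter pvLtG (pvElem arr) _ trG S hp
  induction m with
  | zero =>
    simp only [Nat.cast_zero, zero_add]
    rw [PySem.List.pyRange_one_cons (by omega : (0 : Int) < 1),
        PySem.List.pyRange_one_eq_nil (by omega : (1 : Int) ≤ 0 + 1)]
    simp [pvStep1, pvPopRear, pvCand_zero]
  | succ m ih =>
    push_cast
    rw [PySem.List.pyRange_one_succ_right (by omega : (0 : Int) ≤ (m : Int) + 1),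
        List.foldl_append, ih]
    simp only [List.foldl_cons, List.foldl_nil, pvStep1]
    rw [hpS ((m : Int) + 1) _ (pvCand_pairwise pvLtS (pvElem arr) 0 m),
        hpG ((m : Int) + 1) _ (pvCand_pairwise pvLtG (pvElem arr) 0 m)]
    have e1 := pvCand_succ pvLtS (pvElem arr) 0 m
    have e2 := pvCand_succ pvLtG (pvElem arr) 0 m
    rw [show (0 : Int) + (m : Int) + 1 = (m : Int) + 1 by ring] at e1 e2
    rw [← e1, ← e2]

theorem pvPredS (arr : List Int) (i : Int) :
    (fun j => decide (pvElem arr j ≥ pvElem arr i)) = (fun j => !(pvLtS (pvElem arr j) (pvElem arr i))) := by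
  funext j; simp [pvLtS, ← decide_not, not_lt, ge_iff_le]

theorem pvPredG (arr : List Int) (i : Int) :
    (fun j => decide (pvElem arr j ≤ pvElem arr i)) = (fun j => !(pvLtG (pvElem arr j) (pvElem arr i))) := by
  funext j; simp [pvLtG, ← decide_not, not_lt]

theorem pvSecondLoop (arr : List Int) (kk : Nat) (m : Nat) :
    (PySem.List.pyRange ((kk : Int) + 1) ((kk : Int) + 1 + m) 1).foldl (pvStep2 arr ((kk : Int) + 1))
        (0, pvCand pvLtS (pvElem arr) 0 kk, pvCand pvLtG (pvElem arr) 0 kk)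
      = ((PySem.List.pyRange 0 (m : Int) 1).foldl
           (fun Sum start => Sum + (pvWindow arr ((kk : Int) + 1) start).1 + (pvWindow arr ((kk : Int) + 1) start).2) 0,
         pvCand pvLtS (pvElem arr) (m : Int) kk, pvCand pvLtG (pvElem arr) (m : Int) kk) := by
  have trS : ∀ u v w : Int, pvLtS u v = true → pvLtS v w = true → pvLtS u w = true := by
    intro u v w; simp [pvLtS]; omega
  have trG : ∀ u v w : Int, pvLtG u v = true → pvLtG v w = true → pvLtG u w = true := by
    intro u v w; simp [pvLtG]; omega
  induction m with
  | zero =>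
    rw [PySem.List.pyRange_one_eq_nil (by omega),
        PySem.List.pyRange_one_eq_nil (by omega)]
    simp
  | succ m ih =>
    have hdq : ∀ (lt : Int → Int → Bool),
        (∀ u v w : Int, lt u v = true → lt v w = true → lt u w = true) →
        pvPopRear (fun j => !(lt (pvElem arr j) (pvElem arr ((kk : Int) + 1 + m))))
            ((pvCand lt (pvElem arr) (m : Int) kk).dropWhile (fun j => decide (j ≤ (m : Int))))
          ++ [(kk : Int) + 1 + m]
          = pvCand lt (pvElem arr) ((m : Int) + 1) kk := by
      intro lt htr
      cases kk with
      | zero =>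
        rw [pvCand_zero, pvCand_zero]
        simp only [Nat.cast_zero, zero_add, List.dropWhile_cons, decide_eq_true_eq, le_refl,
          if_true, List.dropWhile_nil]
        simp [pvPopRear]
        ring
      | succ kk' =>
        rw [pvCand_slide lt (pvElem arr) (m : Int) kk',
            pvPopRear_filter lt (pvElem arr) _ htr _
              (pvCand_pairwise lt (pvElem arr) ((m : Int) + 1) kk')]
        have e := pvCand_succ lt (pvElem arr) ((m : Int) + 1) kk'
        rw [show ((m : Int) + 1) + (kk' : Int) + 1 = ((kk' + 1 : Nat) : Int) + 1 + (m : Int) by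
              push_cast; ring] at e
        rw [← e]
    push_cast
    rw [show (kk : Int) + 1 + ((m : Int) + 1) = ((kk : Int) + 1 + (m : Int)) + 1 by ring,
        PySem.List.pyRange_one_succ_right (by omega : (kk : Int) + 1 ≤ (kk : Int) + 1 + (m : Int)),
        List.foldl_append, ih]
    simp only [List.foldl_cons, List.foldl_nil, pvStep2]
    rw [show (kk : Int) + 1 + (m : Int) - ((kk : Int) + 1) = (m : Int) by ring,
        pvPredS arr ((kk : Int) + 1 + (m : Int)), pvPredG arr ((kk : Int) + 1 + (m : Int)),
        hdq pvLtS trS, hdq pvLtG trG,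
        PySem.List.pyRange_one_succ_right (by omega : (0 : Int) ≤ (m : Int)),
        List.foldl_append]
    simp only [List.foldl_cons, List.foldl_nil]
    rw [pvWindow_eq arr kk (m : Int)]

-- ===== VERDICT (by name: the statement is the Claim_ definition above) =====
theorem SumOfKsubArray_spec : Claim_equal_SumOfKsubArray := by
  intro arr n k hdom hpre
  unfold Spec_SumOfKsubArray
  obtain ⟨hk1, -, -⟩ := hpre
  obtain ⟨kk, hkk⟩ : ∃ kk : Nat, k = (kk : Int) + 1 := ⟨(k - 1).toNat, by omega⟩
  subst hkk
  by_cases hnk : (kk : Int) + 1 ≤ n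
  · obtain ⟨m0, hm0⟩ : ∃ m0 : Nat, n = ((kk : Int) + 1) + (m0 : Int) := ⟨(n - (kk + 1)).toNat, by omega⟩
    subst hm0
    simp only [SumOfKsubArray, SumOfKsubArray_alt]
    rw [pvFirstLoop arr kk]
    simp only []
    rw [pvSecondLoop arr kk m0]
    simp only []
    rw [show max ((kk : Int) + 1 + (m0 : Int) - ((kk : Int) + 1) + 1) 1 = (m0 : Int) + 1 by omega,
        PySem.List.pyRange_one_succ_right (by omega : (0 : Int) ≤ (m0 : Int)),
        List.foldl_append]
    simp only [List.foldl_cons, List.foldl_nil]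
    rw [pvWindow_eq arr kk (m0 : Int)]
  · simp only [SumOfKsubArray, SumOfKsubArray_alt]
    rw [pvFirstLoop arr kk]
    simp only []
    rw [PySem.List.pyRange_one_eq_nil (by omega : n ≤ (kk : Int) + 1)]
    simp only [List.foldl_nil]
    rw [show max (n - ((kk : Int) + 1) + 1) 1 = 1 by omega,
        PySem.List.pyRange_one_cons (by omega : (0 : Int) < 1),
        PySem.List.pyRange_one_eq_nil (by omega : (1 : Int) ≤ 0 + 1)]
    simp only [List.foldl_cons, List.foldl_nil]
    rw [pvWindow_eq arr kk 0]
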